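-- pv_equiv track=rewrite | github.com/phildsnutz/Xiphos-Vetting | backend/graph_ingest.py | _graph_training_fixture_profile
-- ===== SOURCE A (Python) =====
-- from typing import Any
--
-- REL_SUPPLIES_COMPONENT_TO = "supplies_component_to"
--
-- REL_SUPPLIES_COMPONENT = "supplies_component"
--
-- REL_INTEGRATED_INTO = "integrated_into"
--
-- REL_MAINTAINS_SYSTEM_FOR = "maintains_system_for"
--
-- REL_SUPPORTS_SITE = "supports_site"
--
-- REL_SUBSTITUTABLE_WITH = "substitutable_with"
--
-- REL_SINGLE_POINT_OF_FAILURE_FOR = "single_point_of_failure_for"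
--
-- REL_DEPENDS_ON_NETWORK = "depends_on_network"
--
-- REL_ROUTES_PAYMENT_THROUGH = "routes_payment_through"
--
-- REL_DISTRIBUTED_BY = "distributed_by"
--
-- REL_OPERATES_FACILITY = "operates_facility"
--
-- REL_SHIPS_VIA = "ships_via"
--
-- REL_DEPENDS_ON_SERVICE = "depends_on_service"
--
-- def _graph_training_fixture_profile(rows: list[dict[str, Any]]) -> str:
--     relation_types = {
--         str(row.get("relationship_type") or "").strip().lower()
--         for row in rows
--         if str(row.get("relationship_type") or "").strip()
--     }
--     if relation_types & {
--         REL_DEPENDS_ON_NETWORK,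
--         REL_DEPENDS_ON_SERVICE,
--         REL_OPERATES_FACILITY,
--         REL_INTEGRATED_INTO,
--         REL_SUPPLIES_COMPONENT,
--         REL_SUPPLIES_COMPONENT_TO,
--         REL_MAINTAINS_SYSTEM_FOR,
--         REL_SUPPORTS_SITE,
--         REL_SUBSTITUTABLE_WITH,
--         REL_SINGLE_POINT_OF_FAILURE_FOR,
--     }:
--         return "supplier_cyber_trust"
--     if relation_types & {REL_DISTRIBUTED_BY, REL_SHIPS_VIA, REL_ROUTES_PAYMENT_THROUGH}:
--         return "trade_compliance"
--     return "defense_acquisition"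
-- ===== SOURCE B (Python) =====
-- from typing import Any
--
-- _SUPPLIER_RELS = frozenset({
--     "depends_on_network", "depends_on_service", "operates_facility",
--     "integrated_into", "supplies_component", "supplies_component_to",
--     "maintains_system_for", "supports_site", "substitutable_with",
--     "single_point_of_failure_for",
-- })
--
-- _TRADE_RELS = frozenset({"distributed_by", "ships_via", "routes_payment_through"})
--
--
-- def _graph_training_fixture_profile(rows: list[dict[str, Any]]) -> str:
--     found_trade = False
--     for row in rows:
--         rel = str(row.get("relationship_type") or "").strip().lower()
--         if not rel:
--             continue
--         if rel in _SUPPLIER_RELS: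
--             return "supplier_cyber_trust"
--         if rel in _TRADE_RELS:
--             found_trade = True
--     return "trade_compliance" if found_trade else "defense_acquisition"
-- ===== Notes on version B (the rewrite author's own statement) =====
-- stated objective: alternative
-- what changed: Replaced the set-comprehension-then-two-intersections pipeline by a single pass over rows with an early return on a supplier relation and a flag for trade relations, so no intermediate set is built.
import Mathlib
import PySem

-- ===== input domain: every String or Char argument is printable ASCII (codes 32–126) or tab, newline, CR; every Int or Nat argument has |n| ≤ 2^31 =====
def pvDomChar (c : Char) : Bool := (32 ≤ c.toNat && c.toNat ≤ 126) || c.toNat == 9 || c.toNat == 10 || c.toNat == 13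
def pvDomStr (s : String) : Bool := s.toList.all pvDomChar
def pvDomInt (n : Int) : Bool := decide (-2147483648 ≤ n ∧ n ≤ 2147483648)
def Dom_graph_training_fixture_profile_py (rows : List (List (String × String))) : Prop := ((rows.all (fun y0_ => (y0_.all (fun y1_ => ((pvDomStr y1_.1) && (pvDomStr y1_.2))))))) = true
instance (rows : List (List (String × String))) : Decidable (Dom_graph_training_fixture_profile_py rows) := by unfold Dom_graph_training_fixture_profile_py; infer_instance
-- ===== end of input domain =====

-- B replaces A's build-a-set-then-intersect-twice pipeline by one pass with an early return
-- and a trade flag (objective: alternative decomposition, same cost).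

-- ===== PORT A =====
-- the supplier-category set literal of A
def pvSupplierRels : List String :=
  ["depends_on_network", "depends_on_service", "operates_facility", "integrated_into",
   "supplies_component", "supplies_component_to", "maintains_system_for", "supports_site",
   "substitutable_with", "single_point_of_failure_for"]

-- the trade-category set literal of A
def pvTradeRels : List String := ["distributed_by", "ships_via", "routes_payment_through"]

-- str(row.get("relationship_type") or "") — values are strings, so `or ""` is get with default ""
def pvRelRaw (row : List (String × String)) : String :=
  PySem.Dict.getD ⟨row⟩ "relationship_type" ""

def graph_training_fixture_profile_py (rows : List (List (String × String))) : String :=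
  let relationTypes : PySem.Set String :=
    rows.foldl (fun s row =>
      let stripped := PySem.Str.strip (pvRelRaw row)
      if stripped ≠ "" then PySem.Set.add s (PySem.Str.lower stripped) else s) PySem.Set.empty
  if PySem.Set.inter relationTypes pvSupplierRels ≠ [] then "supplier_cyber_trust"
  else if PySem.Set.inter relationTypes pvTradeRels ≠ [] then "trade_compliance"
  else "defense_acquisition"

-- ===== PORT B =====
def pvLoopB : List (List (String × String)) → Bool → String
  | [], foundTrade => if foundTrade then "trade_compliance" else "defense_acquisition"
  | row :: rest, foundTrade =>
    let rel := PySem.Str.lower (PySem.Str.strip (PySem.Dict.getD ⟨row⟩ "relationship_type" ""))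
    if rel = "" then pvLoopB rest foundTrade
    else if rel ∈ pvSupplierRels then "supplier_cyber_trust"
    else if rel ∈ pvTradeRels then pvLoopB rest true
    else pvLoopB rest foundTrade

def graph_training_fixture_profile_py_alt (rows : List (List (String × String))) : String :=
  pvLoopB rows false

-- ===== PRECONDITION & SPEC =====
def Spec_graph_training_fixture_profile_py (rows : List (List (String × String))) (out : String) : Prop := out = graph_training_fixture_profile_py_alt rows
instance (rows : List (List (String × String))) (out : String) : Decidable (Spec_graph_training_fixture_profile_py rows out) := by unfold Spec_graph_training_fixture_profile_py; infer_instance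

-- ===== CLAIM (what is proved, stated in full; the proofs are below) =====
def Claim_equal_graph_training_fixture_profile_py : Prop := ∀ (rows : List (List (String × String))), Dom_graph_training_fixture_profile_py rows → Spec_graph_training_fixture_profile_py rows (graph_training_fixture_profile_py rows)

-- ===== LEMMAS AND PROOFS =====

-- normalised relation type of a row
def pvNorm (row : List (String × String)) : String :=
  PySem.Str.lower (PySem.Str.strip (pvRelRaw row))

-- membership in A's accumulated set
theorem pv_mem_fold (rows : List (List (String × String))) (init : PySem.Set String) (x : String) :
    (x ∈ rows.foldl (fun s row =>
      if PySem.Str.strip (pvRelRaw row) ≠ "" then PySem.Set.add s (PySem.Str.lower (PySem.Str.strip (pvRelRaw row))) else s) init)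
    ↔ (x ∈ init ∨ ∃ row ∈ rows, PySem.Str.strip (pvRelRaw row) ≠ "" ∧ x = pvNorm row) := by
  induction rows generalizing init with
  | nil => simp
  | cons r rs ih =>
    rw [List.foldl_cons]
    by_cases h : PySem.Str.strip (pvRelRaw r) = ""
    · rw [if_neg (by simp [h]), ih]
      simp only [List.mem_cons, exists_eq_or_imp, pvNorm, h, ne_eq, not_true_eq_false,
        false_and, false_or]
    · rw [if_pos h, ih, PySem.Set.mem_add]
      simp only [List.mem_cons, exists_eq_or_imp, pvNorm, ne_eq, h, not_false_eq_true,
        true_and, or_assoc]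

theorem pv_inter_ne_nil (s : PySem.Set String) (L : List String) :
    (PySem.Set.inter s L ≠ []) ↔ ∃ x ∈ s, x ∈ L := by
  simp [PySem.Set.inter, List.eq_nil_iff_forall_not_mem]

-- A's result in terms of existence of a supplier / trade relation among the rows
theorem pvA_char (rows : List (List (String × String))) :
    graph_training_fixture_profile_py rows =
      if ∃ row ∈ rows, pvNorm row ∈ pvSupplierRels then "supplier_cyber_trust"
      else if ∃ row ∈ rows, pvNorm row ∈ pvTradeRels then "trade_compliance"
      else "defense_acquisition" := by
  unfold graph_training_fixture_profile_py
  have hS : "" ∉ pvSupplierRels := by decide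
  have hT : "" ∉ pvTradeRels := by decide
  have key : ∀ (L : List String), "" ∉ L →
      ((PySem.Set.inter (rows.foldl (fun s row =>
        if PySem.Str.strip (pvRelRaw row) ≠ "" then PySem.Set.add s (PySem.Str.lower (PySem.Str.strip (pvRelRaw row))) else s) PySem.Set.empty) L ≠ [])
      ↔ ∃ row ∈ rows, pvNorm row ∈ L) := by
    intro L hL
    rw [pv_inter_ne_nil]
    constructor
    · rintro ⟨x, hx, hxL⟩
      rw [pv_mem_fold] at hx
      rcases hx with h | ⟨row, hrow, _, rfl⟩
      · simp [PySem.Set.empty] at h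
      · exact ⟨row, hrow, hxL⟩
    · rintro ⟨row, hrow, hmem⟩
      refine ⟨pvNorm row, ?_, hmem⟩
      rw [pv_mem_fold]
      right
      refine ⟨row, hrow, ?_, rfl⟩
      intro hstrip
      apply hL
      have : pvNorm row = "" := by simp [pvNorm, hstrip]; rfl
      rw [this] at hmem; exact hmem
  simp only [key _ hS, key _ hT]

-- B's loop in terms of the same predicates
theorem pvB_char (rows : List (List (String × String))) (tr : Bool) :
    pvLoopB rows tr =
      if ∃ row ∈ rows, pvNorm row ∈ pvSupplierRels then "supplier_cyber_trust"
      else if tr = true ∨ ∃ row ∈ rows, pvNorm row ∈ pvTradeRels then "trade_compliance"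
      else "defense_acquisition" := by
  induction rows generalizing tr with
  | nil => cases tr <;> simp [pvLoopB]
  | cons r rs ih =>
    have hS : "" ∉ pvSupplierRels := by decide
    have hT : "" ∉ pvTradeRels := by decide
    show (if pvNorm r = "" then pvLoopB rs tr
      else if pvNorm r ∈ pvSupplierRels then "supplier_cyber_trust"
      else if pvNorm r ∈ pvTradeRels then pvLoopB rs true
      else pvLoopB rs tr) = _
    by_cases h0 : pvNorm r = ""
    · have h1 : pvNorm r ∉ pvSupplierRels := by rw [h0]; exact hS
      have h2 : pvNorm r ∉ pvTradeRels := by rw [h0]; exact hT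
      simp [h0, ih, hS, hT]
    · by_cases h1 : pvNorm r ∈ pvSupplierRels
      · simp [h0, h1]
      · by_cases h2 : pvNorm r ∈ pvTradeRels
        · simp [h0, h1, h2, ih]
        · simp [h0, h1, h2, ih]

-- ===== VERDICT (by name: the statement is the Claim_ definition above) =====
theorem graph_training_fixture_profile_py_spec : Claim_equal_graph_training_fixture_profile_py := by
  intro rows _
  unfold Spec_graph_training_fixture_profile_py graph_training_fixture_profile_py_alt
  rw [pvA_char, pvB_char]
  simp
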